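-- pv_equiv track=rewrite | github.com/lathyriso/CS50-Intro-to-Computing | dna.py | suspect_sequence
-- ===== SOURCE A (Python) =====
-- def suspect_sequence(suspect_dna):
--     # List to be used for slicing the dna sequence
--     values = ["AGATC", "TTTTTTCT", "AATG", "TCTAG", "GATA", "TATC", "GAAA", "TCTG"]
--
--     # Dictionnary to count occurence of sequence
--     id_string = {
--         "AGATC": 0,
--         "TTTTTTCT" : 0,
--         "AATG" : 0,
--         "TCTAG" : 0,
--         "GATA" : 0,
--         "TATC" : 0,
--         "GAAA" : 0,
--         "TCTG" : 0
--     }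
--
--     # Loop to creat every instance of variation in the DNA
--     num_seq = 0
--     for word in values:
--         for index in range(len(suspect_dna)):
--             new_str = suspect_dna[index:index+len(word)]
--             if new_str == word:
--                 count = 0
--                 test_str = ""
--                 for val in range(index, len(suspect_dna), len(word)):
--                     test_str = suspect_dna[val:val+len(word)]
--                     if test_str == word:
--                         count += 1
--                     else:
--                         count = 0
--                         break
--                     if count > num_seq:
--                         num_seq = count
--         id_string[word] = num_seq
--         num_seq = 0
--
--
--     # Retrun Number of Occurence in suspect DNA
--     return(id_string)
-- ===== SOURCE B (Python) =====
-- def suspect_sequence(suspect_dna):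
--     words = ["AGATC", "TTTTTTCT", "AATG", "TCTAG", "GATA", "TATC", "GAAA", "TCTG"]
--     n = len(suspect_dna)
--     result = {}
--     for w in words:
--         L = len(w)
--         best = 0
--         # positions i, i+L, i+2L, ... form independent chains; scan each chain
--         # from the right, keeping the current run length in a single scalar
--         for phase in range(L):
--             if phase >= n:
--                 continue
--             cur = 0
--             top = phase + ((n - phase - 1) // L) * L
--             for i in range(top, phase - 1, -L):
--                 if suspect_dna[i:i+L] == w:
--                     cur += 1
--                     if cur > best:
--                         best = cur
--                 else:
--                     cur = 0
--         result[w] = best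
--     return result
-- ===== Notes on version B (the rewrite author's own statement) =====
-- stated objective: alternative
-- what changed: A restarts a repeat count at every matching index (rescanning the run that follows each occurrence); B makes one sweep per pattern and phase class, keeping the current run length in a scalar that is incremented on a match and reset on a mismatch, so no position is rescanned.
import Mathlib
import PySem

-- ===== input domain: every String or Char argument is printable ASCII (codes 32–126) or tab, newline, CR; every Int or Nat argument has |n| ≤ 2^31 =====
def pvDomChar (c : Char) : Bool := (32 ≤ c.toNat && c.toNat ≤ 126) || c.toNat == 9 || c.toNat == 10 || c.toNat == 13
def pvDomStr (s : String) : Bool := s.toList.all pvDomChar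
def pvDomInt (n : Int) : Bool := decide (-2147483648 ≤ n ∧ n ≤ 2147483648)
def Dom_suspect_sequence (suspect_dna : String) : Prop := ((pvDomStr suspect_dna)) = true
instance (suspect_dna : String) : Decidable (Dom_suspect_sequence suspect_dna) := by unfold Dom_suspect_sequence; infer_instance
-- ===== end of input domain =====

-- B replaces A's per-index repeat rescans by one sweep per pattern and phase class keeping the
-- current run length in a scalar (objective: alternative; measured cost on random DNA is the same).

-- ===== PORT A =====
-- the literal words list / zero-initialised dict of A
def pvWords : List String := ["AGATC", "TTTTTTCT", "AATG", "TCTAG", "GATA", "TATC", "GAAA", "TCTG"]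

-- A's innermost 'for val in range(index, len(dna), len(word))' loop with its break,
-- as structural recursion over the materialised range list
def pvAInner (cs w : List Char) (vals : List Int) (count num_seq : Nat) : Nat :=
  match vals with
  | [] => num_seq
  | val :: rest =>
    let test_str := PySem.List.slice cs (some val) (some (val + (w.length : Int)))
    if test_str = w then
      let count' := count + 1
      let num_seq' := if count' > num_seq then count' else num_seq
      pvAInner cs w rest count' num_seq'
    else num_seq   -- count = 0; break

-- A's middle 'for index in range(len(suspect_dna))' loop for one word (num_seq starts at 0)
def pvAWord (cs w : List Char) : Nat :=
  (PySem.List.pyRange 0 (cs.length : Int) 1).foldl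
    (fun num_seq index =>
      let new_str := PySem.List.slice cs (some index) (some (index + (w.length : Int)))
      if new_str = w then
        pvAInner cs w (PySem.List.pyRange index (cs.length : Int) (w.length : Int)) 0 num_seq
      else num_seq) 0

def suspect_sequence (suspect_dna : String) : List (String × Int) :=
  let id_string : PySem.Dict String Int := PySem.Dict.ofList (pvWords.map (fun w => (w, 0)))
  (pvWords.foldl
    (fun d word => d.insert word ((pvAWord suspect_dna.toList word.toList : Nat) : Int))
    id_string).items

-- ===== PORT B =====
-- B's inner 'for i in range(top, phase - 1, -L)' loop: state (cur, best)
def pvBChain (cs w : List Char) (vals : List Int) (st : Nat × Nat) : Nat × Nat :=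
  vals.foldl
    (fun st i =>
      if PySem.List.slice cs (some i) (some (i + (w.length : Int))) = w then
        let cur := st.1 + 1
        (cur, if cur > st.2 then cur else st.2)
      else (0, st.2)) st

-- B's 'for phase in range(L)' loop for one word
def pvBWord (cs w : List Char) : Nat :=
  (List.range w.length).foldl
    (fun best phase =>
      if phase ≥ cs.length then best   -- continue
      else
        let top : Int :=
          (phase : Int) +
            PySem.Int.floordiv ((cs.length : Int) - (phase : Int) - 1) (w.length : Int) *
              (w.length : Int)
        (pvBChain cs w (PySem.List.pyRange top ((phase : Int) - 1) (-(w.length : Int))) (0, best)).2)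
    0

def suspect_sequence_alt (suspect_dna : String) : List (String × Int) :=
  (pvWords.foldl
    (fun d w => d.insert w ((pvBWord suspect_dna.toList w.toList : Nat) : Int))
    (PySem.Dict.empty)).items

-- ===== PRECONDITION & SPEC =====
def Spec_suspect_sequence (suspect_dna : String) (out : List (String × Int)) : Prop := out = suspect_sequence_alt suspect_dna
instance (suspect_dna : String) (out : List (String × Int)) : Decidable (Spec_suspect_sequence suspect_dna out) := by unfold Spec_suspect_sequence; infer_instance

-- ===== CLAIM (what is proved, stated in full; the proofs are below) =====
def Claim_equal_suspect_sequence : Prop := ∀ (suspect_dna : String), Dom_suspect_sequence suspect_dna → Spec_suspect_sequence suspect_dna (suspect_sequence suspect_dna)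

-- ===== LEMMAS AND PROOFS =====

-- run length of consecutive copies of w starting at position i
def runlen (cs w : List Char) (i : Nat) : Nat :=
  if h : (cs.drop i).take w.length = w ∧ w ≠ [] then runlen cs w (i + w.length) + 1 else 0
termination_by cs.length - i
decreasing_by
  have h1 : w.length ≤ cs.length - i := by
    have := congrArg List.length h.1
    simp [List.length_take, List.length_drop] at this
    omega
  have h2 : 1 ≤ w.length := List.length_pos_of_ne_nil h.2
  omega

theorem runlen_eq (cs w : List Char) (i : Nat) :
    runlen cs w i =
      if (cs.drop i).take w.length = w ∧ w ≠ [] then runlen cs w (i + w.length) + 1 else 0 := by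
  rw [runlen]
  split <;> simp_all

theorem runlen_of_ge (cs w : List Char) (i : Nat) (h : cs.length ≤ i) :
    runlen cs w i = 0 := by
  rw [runlen_eq]
  have hd : cs.drop i = [] := List.drop_eq_nil_of_le h
  simp [hd]

-- the ceiling-division step used by pyRange's element count
theorem pv_count_succ (x u : Int) (hu : 0 < u) (hx : 0 < x) :
    ((x + u - 1) / u).toNat = ((x - 1) / u).toNat + 1 := by
  have h1 : (x + u - 1) / u = (x - 1) / u + 1 := by
    have : x + u - 1 = (x - 1) + 1 * u := by ring
    rw [this, Int.add_mul_ediv_right _ _ (by omega : u ≠ 0)]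
  have h2 : 0 ≤ (x - 1) / u := Int.ediv_nonneg (by omega) (by omega)
  omega

theorem pyRange_pos_nil (a b s : Int) (hs : 0 < s) (h : b ≤ a) :
    PySem.List.pyRange a b s = [] := by
  simp only [PySem.List.pyRange]
  split
  · rfl
  · rw [if_neg (by omega : ¬ a < b)]
    rfl

theorem pyRange_pos_cons (a b s : Int) (hs : 0 < s) (h : a < b) :
    PySem.List.pyRange a b s = a :: PySem.List.pyRange (a + s) b s := by
  simp only [PySem.List.pyRange]
  rw [if_neg (by omega : ¬ s = 0), if_neg (by omega : ¬ s = 0), if_pos hs, if_pos hs, if_pos h]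
  by_cases h2 : a + s < b
  · rw [if_pos h2]
    have hc : ((b - a + s - 1) / s).toNat = ((b - (a + s) + s - 1) / s).toNat + 1 := by
      have : b - (a + s) + s - 1 = (b - a) - 1 := by ring
      rw [this]
      exact pv_count_succ (b - a) s hs (by omega)
    rw [hc, List.range_succ_eq_map, List.map_cons, List.map_map]
    refine congrArg₂ _ (by ring) (List.map_congr_left ?_)
    intro k _
    simp only [Function.comp]
    push_cast
    ring
  · rw [if_neg h2]
    have hc : ((b - a + s - 1) / s).toNat = 1 := by
      have h1 : (b - a + s - 1) / s = (b - a - 1) / s + 1 := by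
        have : b - a + s - 1 = (b - a - 1) + 1 * s := by ring
        rw [this, Int.add_mul_ediv_right _ _ (by omega : s ≠ 0)]
      have h2' : (b - a - 1) / s = 0 := Int.ediv_eq_zero_of_lt (by omega) (by omega)
      omega
    rw [hc]
    simp

theorem pyRange_neg_nil (a b s : Int) (hs : s < 0) (h : a ≤ b) :
    PySem.List.pyRange a b s = [] := by
  simp only [PySem.List.pyRange]
  rw [if_neg (by omega : ¬ s = 0), if_neg (by omega : ¬ 0 < s), if_neg (by omega : ¬ b < a)]
  rfl

theorem pyRange_neg_cons (a b s : Int) (hs : s < 0) (h : b < a) :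
    PySem.List.pyRange a b s = a :: PySem.List.pyRange (a + s) b s := by
  simp only [PySem.List.pyRange]
  rw [if_neg (by omega : ¬ s = 0), if_neg (by omega : ¬ s = 0),
      if_neg (by omega : ¬ 0 < s), if_neg (by omega : ¬ 0 < s), if_pos h]
  by_cases h2 : b < a + s
  · rw [if_pos h2]
    have hc : ((a - b + -s - 1) / -s).toNat = ((a + s - b + -s - 1) / -s).toNat + 1 := by
      have : a + s - b + -s - 1 = (a - b) - 1 := by ring
      rw [this]
      exact pv_count_succ (a - b) (-s) (by omega) (by omega)
    rw [hc, List.range_succ_eq_map, List.map_cons, List.map_map]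
    refine congrArg₂ _ (by ring) (List.map_congr_left ?_)
    intro k _
    simp only [Function.comp]
    push_cast
    ring
  · rw [if_neg h2]
    have hc : ((a - b + -s - 1) / -s).toNat = 1 := by
      have h1 : (a - b + -s - 1) / -s = (a - b - 1) / -s + 1 := by
        have : a - b + -s - 1 = (a - b - 1) + 1 * -s := by ring
        rw [this, Int.add_mul_ediv_right _ _ (by omega : -s ≠ 0)]
      have h2' : (a - b - 1) / -s = 0 := Int.ediv_eq_zero_of_lt (by omega) (by omega)
      omega
    rw [hc]
    simp

-- A's inner loop computes max num_seq (count + runlen i)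
theorem pvAInner_eq (cs w : List Char) (hw : w ≠ []) :
    ∀ m i count num, cs.length - i ≤ m → count ≤ num →
      pvAInner cs w (PySem.List.pyRange (i : Int) (cs.length : Int) (w.length : Int)) count num
        = max num (count + runlen cs w i) := by
  intro m
  induction m with
  | zero =>
      intro i count num hm hc
      have hi : cs.length ≤ i := by omega
      rw [pyRange_pos_nil _ _ _ (by exact_mod_cast List.length_pos_of_ne_nil hw) (by exact_mod_cast hi)]
      rw [runlen_of_ge cs w i hi]
      simp only [pvAInner]
      omega
  | succ m ih =>
      intro i count num hm hc
      by_cases hi : i < cs.length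
      · rw [pyRange_pos_cons _ _ _ (by exact_mod_cast List.length_pos_of_ne_nil hw) (by exact_mod_cast hi)]
        simp only [pvAInner, PySem.List.slice_natCast_add]
        by_cases hmt : (cs.drop i).take w.length = w
        · rw [if_pos hmt]
          have hcast : (i : Int) + (w.length : Int) = ((i + w.length : Nat) : Int) := by push_cast; ring
          rw [hcast]
          have hL : 1 ≤ w.length := List.length_pos_of_ne_nil hw
          rw [ih (i + w.length) (count + 1) (if count + 1 > num then count + 1 else num)
                (by omega) (by split <;> omega)]
          have hr : runlen cs w i = runlen cs w (i + w.length) + 1 := by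
            rw [runlen_eq, if_pos ⟨hmt, hw⟩]
          have hnum : (if count + 1 > num then count + 1 else num) = max num (count + 1) := by
            split <;> omega
          rw [hr, hnum]
          omega
        · rw [if_neg hmt]
          have hr : runlen cs w i = 0 := by
            rw [runlen_eq, if_neg (fun hcon => hmt hcon.1)]
          rw [hr]
          omega
      · have hi' : cs.length ≤ i := by omega
        rw [pyRange_pos_nil _ _ _ (by exact_mod_cast List.length_pos_of_ne_nil hw) (by exact_mod_cast hi')]
        rw [runlen_of_ge cs w i hi']
        simp only [pvAInner]
        omega

-- A's per-word result is the running max of runlen over all start indices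
theorem pvAWord_eq (cs w : List Char) (hw : w ≠ []) :
    pvAWord cs w = (List.range cs.length).foldl (fun a i => max a (runlen cs w i)) 0 := by
  unfold pvAWord
  rw [PySem.List.pyRange_one, List.foldl_map]
  have hn : ((cs.length : Int) - 0).toNat = cs.length := by omega
  rw [hn]
  refine List.foldl_ext _ _ _ ?_
  intro num k _
  simp only [zero_add, PySem.List.slice_natCast_add]
  by_cases hmt : (cs.drop k).take w.length = w
  · rw [if_pos hmt]
    rw [pvAInner_eq cs w hw cs.length k 0 num (by omega) (by omega)]
    omega
  · rw [if_neg hmt]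
    have hr : runlen cs w k = 0 := by
      rw [runlen_eq, if_neg (fun hcon => hmt hcon.1)]
    rw [hr]
    omega

-- pulling an accumulated max out of a running-max fold
theorem foldl_max_out (l : List Nat) (f : Nat → Nat) (b x : Nat) :
    l.foldl (fun a j => max a (f j)) (max b x) = max (l.foldl (fun a j => max a (f j)) b) x := by
  induction l generalizing b x with
  | nil => rfl
  | cons h t ih =>
      simp only [List.foldl_cons]
      rw [show max (max b x) (f h) = max (max b (f h)) x by omega, ih]

-- unfolding one step of B's chain fold
theorem pvBChain_cons (cs w : List Char) (i : Int) (rest : List Int) (st : Nat × Nat) :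
    pvBChain cs w (i :: rest) st
      = pvBChain cs w rest
          (if PySem.List.slice cs (some i) (some (i + (w.length : Int))) = w then
            (st.1 + 1, if st.1 + 1 > st.2 then st.1 + 1 else st.2)
          else (0, st.2)) := by
  simp only [pvBChain, List.foldl_cons]

-- B's inner loop over one chain accumulates max best (runlen over the chain)
theorem pvBChain_eq (cs w : List Char) (hw : w ≠ []) :
    ∀ (k phase : Nat) cur best, cur = runlen cs w (phase + k * w.length + w.length) →
      (pvBChain cs w
          (PySem.List.pyRange ((phase + k * w.length : Nat) : Int) ((phase : Int) - 1)
            (-(w.length : Int))) (cur, best)).2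
        = (List.range (k + 1)).foldl (fun b j => max b (runlen cs w (phase + j * w.length))) best := by
  intro k
  have hL : 1 ≤ w.length := List.length_pos_of_ne_nil hw
  induction k with
  | zero =>
      intro phase cur best hcur
      rw [pyRange_neg_cons _ _ _ (by omega) (by push_cast; omega),
          pyRange_neg_nil _ _ _ (by omega) (by push_cast; omega)]
      rw [pvBChain_cons]
      simp only [PySem.List.slice_natCast_add, Nat.zero_mul, Nat.add_zero, Nat.zero_add,
        List.range_one, List.foldl_cons, List.foldl_nil] at hcur ⊢
      by_cases hmt : (cs.drop phase).take w.length = w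
      · rw [if_pos hmt]
        have hr : runlen cs w phase = cur + 1 := by
          rw [runlen_eq, if_pos ⟨hmt, hw⟩, ← hcur]
        rw [hr]
        simp only [pvBChain, List.foldl_nil]
        split <;> omega
      · rw [if_neg hmt]
        have hr : runlen cs w phase = 0 := by
          rw [runlen_eq, if_neg (fun hcon => hmt hcon.1)]
        rw [hr]
        simp only [pvBChain, List.foldl_nil]
        omega
  | succ k ih =>
      intro phase cur best hcur
      have hkl : (0 : Int) ≤ ((k : Int) + 1) * (w.length : Int) := by positivity
      rw [pyRange_neg_cons _ _ _ (by omega) (by push_cast; omega)]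
      have hcast : ((phase + (k + 1) * w.length : Nat) : Int) + -(w.length : Int)
          = ((phase + k * w.length : Nat) : Int) := by push_cast; ring
      rw [pvBChain_cons, hcast]
      simp only [PySem.List.slice_natCast_add]
      have hnext : runlen cs w (phase + (k + 1) * w.length)
          = runlen cs w (phase + k * w.length + w.length) := by
        congr 1
        ring
      have hrhs : (List.range (k + 1 + 1)).foldl
            (fun b j => max b (runlen cs w (phase + j * w.length))) best
          = max ((List.range (k + 1)).foldl
              (fun b j => max b (runlen cs w (phase + j * w.length))) best)
              (runlen cs w (phase + (k + 1) * w.length)) := by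
        rw [List.range_succ, List.foldl_append]
        simp
      by_cases hmt : (cs.drop (phase + (k + 1) * w.length)).take w.length = w
      · rw [if_pos hmt]
        have hrt : runlen cs w (phase + (k + 1) * w.length) = cur + 1 := by
          rw [runlen_eq, if_pos ⟨hmt, hw⟩]
          rw [show phase + (k + 1) * w.length + w.length
                = phase + (k + 1) * w.length + w.length from rfl] at hcur
          omega
        rw [ih phase (cur + 1) (if cur + 1 > best then cur + 1 else best)
              (by rw [← hnext, hrt])]
        have hb : (if cur + 1 > best then cur + 1 else best)
            = max best (runlen cs w (phase + (k + 1) * w.length)) := by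
          rw [hrt]; split <;> omega
        rw [hb, foldl_max_out, hrhs]
      · rw [if_neg hmt]
        have hrt : runlen cs w (phase + (k + 1) * w.length) = 0 := by
          rw [runlen_eq, if_neg (fun hcon => hmt hcon.1)]
        rw [ih phase 0 best (by rw [← hnext, hrt])]
        rw [hrhs, hrt]
        omega

-- B's per-word result is the running max of runlen over the concatenated chains
theorem pvBWord_eq (cs w : List Char) (hw : w ≠ []) :
    pvBWord cs w =
      ((List.range w.length).flatMap
        (fun phase =>
          if phase < cs.length then
            (List.range ((cs.length - phase - 1) / w.length + 1)).map
              (fun j => phase + j * w.length)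
          else [])).foldl (fun a i => max a (runlen cs w i)) 0 := by
  have hL : 1 ≤ w.length := List.length_pos_of_ne_nil hw
  unfold pvBWord
  rw [List.foldl_flatMap]
  refine List.foldl_ext _ _ _ ?_
  intro best phase hph
  by_cases hphn : phase < cs.length
  · rw [if_neg (by omega : ¬ phase ≥ cs.length), if_pos hphn]
    set kp := (cs.length - phase - 1) / w.length with hkp
    have hdm := Nat.div_add_mod (cs.length - phase - 1) w.length
    have hmlt := Nat.mod_lt (cs.length - phase - 1) (by omega : 0 < w.length)
    have htop : (phase : Int) +
        PySem.Int.floordiv ((cs.length : Int) - (phase : Int) - 1) (w.length : Int) * (w.length : Int)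
        = ((phase + kp * w.length : Nat) : Int) := by
      have hc : ((cs.length : Int) - (phase : Int) - 1) = ((cs.length - phase - 1 : Nat) : Int) := by
        omega
      rw [hc, PySem.Int.floordiv_natCast]
      push_cast [hkp]
      ring
    have hub : cs.length - phase - 1 < kp * w.length + w.length := by
      have := Nat.lt_div_mul_add (by omega : 0 < w.length) (a := cs.length - phase - 1)
      omega
    rw [htop, pvBChain_eq cs w hw kp phase 0 best
          (by rw [runlen_of_ge cs w _ (by omega)])]
    rw [List.foldl_map]
  · rw [if_pos (by omega : phase ≥ cs.length), if_neg hphn]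
    rfl

-- the concatenated chains are a permutation of range n
theorem pv_chains_perm (n L : Nat) (hL : 0 < L) :
    ((List.range L).flatMap
      (fun phase =>
        if phase < n then
          (List.range ((n - phase - 1) / L + 1)).map (fun j => phase + j * L)
        else [])).Perm (List.range n) := by
  refine (List.perm_ext_iff_of_nodup ?_ List.nodup_range).mpr ?_
  · rw [List.nodup_flatMap]
    constructor
    · intro phase _
      split
      · exact List.nodup_range.map
          (fun a b hab => Nat.eq_of_mul_eq_mul_right hL (Nat.add_left_cancel hab))
      · exact List.nodup_nil
    · rw [List.pairwise_iff_getElem]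
      intro i j hi hj hij
      simp only [Function.onFun, List.getElem_range]
      intro x hx hx'
      have hi' : i < L := by simpa using hi
      have hj' : j < L := by simpa using hj
      split at hx
      · simp only [List.mem_map, List.mem_range] at hx
        obtain ⟨a, _, ha⟩ := hx
        split at hx'
        · simp only [List.mem_map, List.mem_range] at hx'
          obtain ⟨b, _, hb⟩ := hx'
          have h1 : x % L = i := by
            rw [← ha, Nat.add_mul_mod_self_right, Nat.mod_eq_of_lt hi']
          have h2 : x % L = j := by
            rw [← hb, Nat.add_mul_mod_self_right, Nat.mod_eq_of_lt hj']
          omega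
        · simp at hx'
      · simp at hx
  · intro x
    simp only [List.mem_flatMap, List.mem_range]
    constructor
    · rintro ⟨phase, hph, hx⟩
      split at hx
      · simp only [List.mem_map, List.mem_range] at hx
        obtain ⟨j, hj, rfl⟩ := hx
        have : j * L ≤ n - phase - 1 :=
          (Nat.le_div_iff_mul_le hL).mp (by omega : j ≤ (n - phase - 1) / L)
        omega
      · simp at hx
    · intro hx
      refine ⟨x % L, Nat.mod_lt _ hL, ?_⟩
      rw [if_pos (by have := Nat.mod_le x L; omega)]
      simp only [List.mem_map, List.mem_range]
      refine ⟨x / L, ?_, by rw [Nat.mod_add_div']⟩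
      have hdm := Nat.mod_add_div' x L
      have h2 : x / L * L ≤ n - x % L - 1 := by omega
      have := (Nat.le_div_iff_mul_le hL).mpr h2
      omega

-- A and B agree on every (nonempty) word
theorem suspect_sequence_word_eq (cs w : List Char) (hw : w ≠ []) :
    pvAWord cs w = pvBWord cs w := by
  rw [pvAWord_eq cs w hw, pvBWord_eq cs w hw]
  exact (List.Perm.foldl_eq (f := fun a i => max a (runlen cs w i))
    (rcomm := ⟨fun a b c => max_right_comm a _ _⟩)
    (pv_chains_perm cs.length w.length (List.length_pos_of_ne_nil hw)) 0).symm

-- ===== VERDICT (by name: the statement is the Claim_ definition above) =====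
theorem suspect_sequence_spec : Claim_equal_suspect_sequence := by
  intro s _
  unfold Spec_suspect_sequence suspect_sequence suspect_sequence_alt
  have h := fun w hw => suspect_sequence_word_eq s.toList w hw
  simp only [pvWords, List.foldl, List.map, PySem.Dict.ofList]
  rw [h "AGATC".toList (by decide), h "TTTTTTCT".toList (by decide), h "AATG".toList (by decide),
      h "TCTAG".toList (by decide), h "GATA".toList (by decide), h "TATC".toList (by decide),
      h "GAAA".toList (by decide), h "TCTG".toList (by decide)]
  simp [PySem.Dict.update, PySem.Dict.insert, PySem.Dict.contains, PySem.Dict.empty]
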